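-- pv_equiv track=rewrite | github.com/Elisa7584/EjerciciosPrueba | DibujoPino.py | dibujarLateralDerecho
-- ===== SOURCE A (Python) =====
-- def patronFila(simbolo,ancho):
--     return  simbolo*ancho
--
-- def dibujarLateralDerecho(simbolo,ancho,alto):
--     dibujo = ""
--     patron = ""
--     for fila in range(alto):
--         dibujo += patron
--         patron += patronFila(simbolo,ancho)
--         dibujo +=  "\n"
--     return dibujo
-- ===== SOURCE B (Python) =====
-- def dibujarLateralDerecho(simbolo, ancho, alto):
--     # each row's width is computed in closed form from its index: no running buffer
--     return ''.join([simbolo * (fila * ancho) + '\n' for fila in range(alto)])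
-- ===== Notes on version B (the rewrite author's own statement) =====
-- stated objective: simpler
-- what changed: drops the running 'patron' accumulator and computes each row in closed form from its index (simbolo*(fila*ancho)), joining the rows in one expression
import Mathlib
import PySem

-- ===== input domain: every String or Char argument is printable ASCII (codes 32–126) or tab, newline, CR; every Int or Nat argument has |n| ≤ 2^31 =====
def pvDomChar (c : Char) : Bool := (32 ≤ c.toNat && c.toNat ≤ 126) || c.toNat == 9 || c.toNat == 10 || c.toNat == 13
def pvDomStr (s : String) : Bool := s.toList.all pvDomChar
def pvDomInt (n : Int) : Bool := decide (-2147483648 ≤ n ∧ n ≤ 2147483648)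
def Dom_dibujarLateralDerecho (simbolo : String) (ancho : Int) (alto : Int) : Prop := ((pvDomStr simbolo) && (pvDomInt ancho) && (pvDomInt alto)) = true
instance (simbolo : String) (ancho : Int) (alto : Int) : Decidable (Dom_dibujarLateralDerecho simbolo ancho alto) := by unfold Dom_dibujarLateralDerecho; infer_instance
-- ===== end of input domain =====

-- B replaces A's running 'patron' accumulator by a closed-form row width (simpler decomposition, same cost).

-- ===== PORT A =====
def patronFila (simbolo : String) (ancho : Int) : List Char :=
  PySem.List.pyRepeat simbolo.toList ancho

def dibujarLateralDerecho (simbolo : String) (ancho : Int) (alto : Int) : String :=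
  -- dibujo = ""; patron = ""; for fila in range(alto): dibujo += patron; patron += patronFila(...); dibujo += "\n"
  let st := (PySem.List.pyRange 0 alto 1).foldl
    (fun (st : List Char × List Char) _fila =>
      (st.1 ++ st.2 ++ ['\n'], st.2 ++ patronFila simbolo ancho)) ([], [])
  String.ofList st.1

-- ===== PORT B =====
def dibujarLateralDerecho_alt (simbolo : String) (ancho : Int) (alto : Int) : String :=
  -- ''.join(simbolo * (fila * ancho) + '\n' for fila in range(alto))
  String.ofList (((PySem.List.pyRange 0 alto 1).map
    (fun fila => PySem.List.pyRepeat simbolo.toList (fila * ancho) ++ ['\n'])).flatten)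

-- ===== PRECONDITION & SPEC =====
def Spec_dibujarLateralDerecho (simbolo : String) (ancho : Int) (alto : Int) (out : String) : Prop := out = dibujarLateralDerecho_alt simbolo ancho alto
instance (simbolo : String) (ancho : Int) (alto : Int) (out : String) : Decidable (Spec_dibujarLateralDerecho simbolo ancho alto out) := by unfold Spec_dibujarLateralDerecho; infer_instance

-- ===== CLAIM (what is proved, stated in full; the proofs are below) =====
def Claim_equal_dibujarLateralDerecho : Prop := ∀ (simbolo : String) (ancho : Int) (alto : Int), Dom_dibujarLateralDerecho simbolo ancho alto → Spec_dibujarLateralDerecho simbolo ancho alto (dibujarLateralDerecho simbolo ancho alto)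

-- ===== LEMMAS AND PROOFS =====

-- patron grows by one block per row: s * ((n+1)*a) = s * (n*a) ++ s * a
lemma pyRepeat_mul_succ (s : List Char) (a : Int) (n : Nat) :
    PySem.List.pyRepeat s (((n : Int) + 1) * a)
      = PySem.List.pyRepeat s ((n : Int) * a) ++ PySem.List.pyRepeat s a := by
  unfold PySem.List.pyRepeat
  rcases le_or_gt a 0 with h | h
  · have h1 : (((n : Int) + 1) * a).toNat = 0 := Int.toNat_of_nonpos (by nlinarith)
    have h2 : (((n : Int)) * a).toNat = 0 :=
      Int.toNat_of_nonpos (mul_nonpos_of_nonneg_of_nonpos (by positivity) h)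
    have h3 : a.toNat = 0 := Int.toNat_of_nonpos h
    simp [h1, h2, h3]
  · have heq : ((n : Int) + 1) * a = (n : Int) * a + a := by ring
    have h1 : (((n : Int) + 1) * a).toNat = ((n : Int) * a).toNat + a.toNat := by
      rw [heq, Int.toNat_add (mul_nonneg (by positivity) h.le) h.le]
    rw [h1, List.replicate_add, List.flatten_append]

-- loop invariant: after n rows, dibujo is B's join of the first n rows and patron is s * (n*a)
lemma loop_inv (s : List Char) (a : Int) (n : Nat) :
    (PySem.List.pyRange 0 (n : Int) 1).foldl
      (fun (st : List Char × List Char) _fila =>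
        (st.1 ++ st.2 ++ ['\n'], st.2 ++ PySem.List.pyRepeat s a)) ([], [])
    = (((PySem.List.pyRange 0 (n : Int) 1).map
          (fun fila => PySem.List.pyRepeat s (fila * a) ++ ['\n'])).flatten,
        PySem.List.pyRepeat s ((n : Int) * a)) := by
  induction n with
  | zero => simp [PySem.List.pyRange_one_eq_nil (le_refl (0 : Int)), PySem.List.pyRepeat]
  | succ n ih =>
      have hsplit : PySem.List.pyRange 0 ((n : Int) + 1) 1
          = PySem.List.pyRange 0 (n : Int) 1 ++ [(n : Int)] :=
        PySem.List.pyRange_one_succ_right (by positivity)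
      push_cast
      rw [hsplit, List.foldl_append, ih, List.map_append, List.flatten_append]
      simp [pyRepeat_mul_succ s a n, List.append_assoc]

-- ===== VERDICT (by name: the statement is the Claim_ definition above) =====
theorem dibujarLateralDerecho_spec : Claim_equal_dibujarLateralDerecho := by
  intro simbolo ancho alto _
  unfold Spec_dibujarLateralDerecho dibujarLateralDerecho dibujarLateralDerecho_alt patronFila
  rcases le_or_gt alto 0 with h | h
  · simp [PySem.List.pyRange_one_eq_nil h]
  · have halto : ((alto.toNat : Nat) : Int) = alto := Int.toNat_of_nonneg h.le
    rw [← halto, loop_inv simbolo.toList ancho alto.toNat]
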